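-- pv_equiv track=rewrite | github.com/jam928/python-algo | leetcode/arrays_and_hashing/min_space_string.py | optimize_str
-- ===== SOURCE A (Python) =====
-- def optimize_str(s):
--     freq_map = {}
--
--     for c in s:
--         freq_map[c] = freq_map.get(c, 0) + 1
--
--     # sort by descending order via the values in map
--     sorted_by_values = dict(sorted(freq_map.items(), key=lambda kv: kv[1], reverse=True))
--
--     s = ""
--     while len(list(sorted_by_values.items())) > 0:
--         for k, v in list(sorted_by_values.items()):
--             s += k
--             sorted_by_values[k] -= 1
--             if sorted_by_values[k] == 0:
--                 del sorted_by_values[k]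
--
--     return s
-- ===== SOURCE B (Python) =====
-- def optimize_str(s):
--     freq = {}
--     for c in s:
--         freq[c] = freq.get(c, 0) + 1
--     ranked = sorted(freq.items(), key=lambda kv: kv[1], reverse=True)
--     top = ranked[0][1] if ranked else 0
--     return ''.join(c for i in range(top) for c, n in ranked if n > i)
-- ===== Notes on version B (the rewrite author's own statement) =====
-- stated objective: simpler
-- what changed: A repeatedly rescans a mutated dict, decrementing counts and deleting exhausted keys round by round; B computes the frequency table once, sorts it by descending count, and emits the answer with a single column-major comprehension over range(max_count) with no mutation.
import Mathlib
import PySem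

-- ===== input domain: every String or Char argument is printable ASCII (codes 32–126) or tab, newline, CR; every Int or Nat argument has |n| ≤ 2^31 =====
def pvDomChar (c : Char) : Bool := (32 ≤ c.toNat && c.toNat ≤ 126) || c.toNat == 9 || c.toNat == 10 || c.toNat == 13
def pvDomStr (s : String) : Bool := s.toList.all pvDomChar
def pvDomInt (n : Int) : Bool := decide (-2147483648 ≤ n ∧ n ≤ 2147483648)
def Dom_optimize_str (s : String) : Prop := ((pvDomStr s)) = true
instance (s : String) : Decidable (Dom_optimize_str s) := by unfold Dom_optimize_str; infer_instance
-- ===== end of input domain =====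

-- B replaces A's repeated scan-and-decrement over a mutated dict by a single column-major
-- comprehension over the sorted frequency table (no mutation); same return value.

-- ===== PORT A =====
-- one body of A's inner 'for k, v in list(...)' loop: append k, decrement d[k], delete at 0
def pvStepA (st : List Char × PySem.Dict Char Int) (kv : Char × Int) :
    List Char × PySem.Dict Char Int :=
  let acc := st.1 ++ [kv.1]
  let d := st.2.insert kv.1 (st.2.getD kv.1 0 - 1)
  if d.getD kv.1 0 == 0 then (acc, d.erase kv.1) else (acc, d)

-- A's 'while' loop; fuel = len(s) bounds the number of rounds (= the maximal count)
def pvLoopA : Nat → List Char × PySem.Dict Char Int → List Char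
  | 0, st => st.1
  | n+1, st =>
    if st.2.items.length > 0 then pvLoopA n (st.2.items.foldl pvStepA st) else st.1

def optimize_str (s : String) : String :=
  let freq := s.toList.foldl (fun d c => d.insert c (d.getD c 0 + 1)) PySem.Dict.empty
  let sbv := PySem.Dict.ofList (PySem.List.sorted freq.items (fun kv => kv.2) true)
  String.mk (pvLoopA s.toList.length ([], sbv))

-- ===== PORT B =====
def optimize_str_alt (s : String) : String :=
  let freq := s.toList.foldl (fun d c => d.insert c (d.getD c 0 + 1)) PySem.Dict.empty
  let ranked := PySem.List.sorted freq.items (fun kv => kv.2) true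
  let top : Int := match ranked with | [] => 0 | kv :: _ => kv.2
  String.mk ((PySem.List.pyRange 0 top 1).flatMap
    (fun i => (ranked.filter (fun kv => decide (i < kv.2))).map (fun kv => kv.1)))

-- ===== PRECONDITION & SPEC =====
def Spec_optimize_str (s : String) (out : String) : Prop := out = optimize_str_alt s
instance (s : String) (out : String) : Decidable (Spec_optimize_str s out) := by unfold Spec_optimize_str; infer_instance

-- ===== CLAIM (what is proved, stated in full; the proofs are below) =====
def Claim_equal_optimize_str : Prop := ∀ (s : String), Dom_optimize_str s → Spec_optimize_str s (optimize_str s)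

-- ===== LEMMAS AND PROOFS =====

def pvDec (L : List (Char × Int)) : List (Char × Int) :=
  (L.map (fun kv => (kv.1, kv.2 - 1))).filter (fun kv => decide (kv.2 ≠ 0))

lemma pvFind_mid (pre rest : List (Char × Int)) (k : Char) (v : Int)
    (h : k ∉ pre.map Prod.fst) :
    List.find? (fun p => p.1 == k) (pre ++ (k, v) :: rest) = some (k, v) := by
  induction pre with
  | nil => simp
  | cons p t ih =>
    simp only [List.map_cons, List.mem_cons] at h
    push_neg at h
    simp [beq_iff_eq, Ne.symm h.1, ih h.2]

lemma pvMap_noKey (pre : List (Char × Int)) (k : Char) (w : Int)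
    (h : k ∉ pre.map Prod.fst) :
    pre.map (fun p => if (p.1 == k) = true then (k, w) else p) = pre := by
  have hp : ∀ p ∈ pre, (if (p.1 == k) = true then (k, w) else p) = p := by
    intro p hp
    have : ¬ p.1 = k := fun e => h (e ▸ List.mem_map_of_mem hp)
    simp [this]
  exact (List.map_congr_left hp).trans (List.map_id _)

lemma pvFilter_noKey (pre : List (Char × Int)) (k : Char)
    (h : k ∉ pre.map Prod.fst) :
    pre.filter (fun p => !p.1 == k) = pre := by
  apply List.filter_eq_self.mpr
  intro p hp
  have : ¬ p.1 = k := fun e => h (e ▸ List.mem_map_of_mem hp)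
  simp [this]


lemma pvReplace (pre rest : List (Char × Int)) (k : Char) (v w : Int)
    (hkpre : k ∉ pre.map Prod.fst) (hkrest : k ∉ rest.map Prod.fst) :
    (pre ++ (k, v) :: rest).map (fun p => if (p.1 == k) = true then (k, w) else p)
      = pre ++ (k, w) :: rest := by
  rw [List.map_append, List.map_cons, pvMap_noKey pre k w hkpre, pvMap_noKey rest k w hkrest]
  simp

lemma pvRound (post pre : List (Char × Int)) (acc : List Char)
    (h : ((pre ++ post).map Prod.fst).Nodup) :
    post.foldl pvStepA (acc, PySem.Dict.mk (pre ++ post)) =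
      (acc ++ post.map Prod.fst, PySem.Dict.mk (pre ++ pvDec post)) := by
  induction post generalizing pre acc with
  | nil => simp [pvDec]
  | cons kv rest ih =>
    obtain ⟨k, v⟩ := kv
    have hshape := h
    simp only [List.map_append, List.map_cons, List.nodup_append, List.nodup_cons] at hshape
    have hkpre : k ∉ pre.map Prod.fst := fun hk =>
      hshape.2.2 k hk k (List.mem_cons_self) rfl
    have hkrest : k ∉ rest.map Prod.fst := hshape.2.1.1
    have hcont : (PySem.Dict.mk (pre ++ (k, v) :: rest)).contains k = true := by
      simp [PySem.Dict.contains]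
    have hgetv : (PySem.Dict.mk (pre ++ (k, v) :: rest)).getD k 0 = v := by
      simp [PySem.Dict.getD, PySem.Dict.get?, pvFind_mid pre rest k v hkpre]
    have hget : (PySem.Dict.mk (pre ++ (k, v - 1) :: rest)).getD k 0 = v - 1 := by
      simp [PySem.Dict.getD, PySem.Dict.get?, pvFind_mid pre rest k (v - 1) hkpre]
    have hins : (PySem.Dict.mk (pre ++ (k, v) :: rest)).insert k
        ((PySem.Dict.mk (pre ++ (k, v) :: rest)).getD k 0 - 1)
        = PySem.Dict.mk (pre ++ (k, v - 1) :: rest) := by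
      rw [hgetv]
      simp only [PySem.Dict.insert, hcont, if_pos]
      congr 1
      exact pvReplace pre rest k v (v - 1) hkpre hkrest
    have hstep : pvStepA (acc, PySem.Dict.mk (pre ++ (k, v) :: rest)) (k, v)
        = (acc ++ [k], PySem.Dict.mk ((pre ++ pvDec [(k, v)]) ++ rest)) := by
      unfold pvStepA
      simp only [hins, hget]
      by_cases hv : v - 1 = 0
      · rw [if_pos (show ((v - 1 : Int) == 0) = true by simp [hv])]
        have hdec1 : pvDec [(k, v)] = [] := by simp [pvDec, hv]
        rw [hdec1]
        simp only [PySem.Dict.erase, PySem.Dict.items, List.filter_append,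
          pvFilter_noKey pre k hkpre]
        simp [pvFilter_noKey rest k hkrest]
      · rw [if_neg (show ¬ ((v - 1 : Int) == 0) = true by simp [hv])]
        have hdec1 : pvDec [(k, v)] = [(k, v - 1)] := by simp [pvDec, hv]
        rw [hdec1]
        simp
    simp only [List.foldl_cons, hstep]
    have h' : (((pre ++ pvDec [(k, v)]) ++ rest).map Prod.fst).Nodup := by
      by_cases hv : v - 1 = 0
      · have hdec1 : pvDec [(k, v)] = [] := by simp [pvDec, hv]
        rw [hdec1, List.append_nil]
        have hsub : (pre ++ rest).Sublist (pre ++ (k, v) :: rest) :=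
          List.Sublist.append_left (List.sublist_cons_self _ _) pre
        exact List.Nodup.sublist (hsub.map Prod.fst) h
      · have hdec1 : pvDec [(k, v)] = [(k, v - 1)] := by simp [pvDec, hv]
        rw [hdec1]
        have hmaps : ((pre ++ [(k, v - 1)] ++ rest).map Prod.fst)
            = ((pre ++ (k, v) :: rest).map Prod.fst) := by simp
        rw [hmaps]
        exact h
    rw [ih (pre ++ pvDec [(k, v)]) (acc ++ [k]) h']
    have hdec : pvDec ((k, v) :: rest) = pvDec [(k, v)] ++ pvDec rest := by
      by_cases hv : v - 1 = 0 <;> simp [pvDec, hv]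
    rw [hdec]
    simp

def pvTop : List (Char × Int) → Int
  | [] => 0
  | kv :: _ => kv.2

def pvB (L : List (Char × Int)) : List Char :=
  (PySem.List.pyRange 0 (pvTop L) 1).flatMap
    (fun i => (L.filter (fun kv => decide (i < kv.2))).map (fun kv => kv.1))

lemma pvRangeEq (a b : Int) :
    PySem.List.pyRange a b 1 = (List.range (b - a).toNat).map (fun k : Nat => a + (k : Int)) := by
  simp only [PySem.List.pyRange, if_neg (by norm_num : ¬(1:Int) = 0),
    if_pos (by norm_num : (0:Int) < 1)]
  split_ifs with h
  · have e : (b - a + 1 - 1) / 1 = b - a := by omega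
    rw [e]
    simp
  · have : (b - a).toNat = 0 := by omega
    simp [this]

lemma pvShift (a b : Int) (g : Int → List Char) :
    (PySem.List.pyRange (a + 1) (b + 1) 1).flatMap g
      = (PySem.List.pyRange a b 1).flatMap (fun i => g (i + 1)) := by
  rw [pvRangeEq, pvRangeEq]
  have e : b + 1 - (a + 1) = b - a := by ring
  rw [e, List.flatMap_map, List.flatMap_map]
  apply List.flatMap_congr  -- guess; may not exist
  intro k _
  congr 1
  ring

lemma pvColShift (L : List (Char × Int)) (i : Int) (hi : 0 ≤ i) :
    ((pvDec L).filter (fun kv => decide (i < kv.2))).map (fun kv => kv.1)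
      = (L.filter (fun kv => decide (i + 1 < kv.2))).map (fun kv => kv.1) := by
  induction L with
  | nil => simp [pvDec]
  | cons kv t ih =>
    obtain ⟨k, v⟩ := kv
    by_cases hv : v - 1 = 0
    · have h1 : pvDec ((k, v) :: t) = pvDec t := by simp [pvDec, List.filter_cons, hv]
      rw [h1, ih]
      have : ¬ (i + 1 < v) := by omega
      simp [List.filter_cons, this]
    · have h1 : pvDec ((k, v) :: t) = (k, v - 1) :: pvDec t := by
        simp [pvDec, List.filter_cons, hv]
      rw [h1]
      by_cases hlt : i < v - 1
      · have : i + 1 < v := by omega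
        simp [List.filter_cons, hlt, this, ih]
      · have : ¬ (i + 1 < v) := by omega
        simp [List.filter_cons, hlt, this, ih]

lemma pvDecCons (k : Char) (v : Int) (t : List (Char × Int)) (hv : ¬ v - 1 = 0) :
    pvDec ((k, v) :: t) = (k, v - 1) :: pvDec t := by
  simp [pvDec, List.filter_cons, hv]

lemma pvRangeNonneg (b : Int) : ∀ i ∈ PySem.List.pyRange 0 b 1, 0 ≤ i := by
  intro i hi
  rw [pvRangeEq] at hi
  obtain ⟨k', -, rfl⟩ := List.mem_map.mp hi
  positivity

lemma pvBstep (L : List (Char × Int)) (hne : L ≠ [])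
    (h1 : ∀ kv ∈ L, 1 ≤ kv.2) (hmax : ∀ kv ∈ L, kv.2 ≤ pvTop L) :
    pvB L = L.map Prod.fst ++ pvB (pvDec L) := by
  cases L with
  | nil => exact absurd rfl hne
  | cons kv t =>
    obtain ⟨k, v⟩ := kv
    have hv1 : 1 ≤ v := h1 (k, v) (by simp)
    have hfilter0 : (((k, v) :: t).filter (fun kv => decide ((0:Int) < kv.2))) = (k, v) :: t :=
      List.filter_eq_self.mpr (fun p hp => by
        have := h1 p hp
        simp only [decide_eq_true_eq]
        omega)
    unfold pvB
    have htop : pvTop ((k, v) :: t) = v := rfl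
    rw [htop, PySem.List.pyRange_one_cons (show (0:Int) < v by omega), List.flatMap_cons,
      hfilter0]
    congr 1
    have e1 : (PySem.List.pyRange (0 + 1) v 1).flatMap
          (fun i => (((k, v) :: t).filter (fun kv => decide (i < kv.2))).map (fun kv => kv.1))
        = (PySem.List.pyRange 0 (v - 1) 1).flatMap
          (fun i => (((k, v) :: t).filter (fun kv => decide (i + 1 < kv.2))).map (fun kv => kv.1)) := by
      have hs := pvShift 0 (v - 1)
        (fun i => (((k, v) :: t).filter (fun kv => decide (i < kv.2))).map (fun kv => kv.1))
      rw [show v - 1 + 1 = v by ring] at hs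
      exact hs
    rw [e1]
    by_cases hv2 : v = 1
    · have hall : pvDec ((k, v) :: t) = [] := by
        apply List.filter_eq_nil_iff.mpr
        intro x hx
        obtain ⟨p, hp, rfl⟩ := List.mem_map.mp hx
        have ha := h1 p hp
        have hb := hmax p hp
        rw [htop] at hb
        simp only [decide_eq_true_eq, Bool.not_eq_true, decide_eq_false_iff_not, Decidable.not_not]
        omega
      rw [hall]
      subst hv2
      simp [pvB, pvTop, pvRangeEq]
    · have hdec := pvDecCons k v t (by omega)
      rw [hdec]
      have htop' : pvTop ((k, v - 1) :: pvDec t) = v - 1 := rfl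
      rw [htop']
      apply List.flatMap_congr
      intro i hi
      have h0i : 0 ≤ i := pvRangeNonneg (v - 1) i hi
      have := pvColShift ((k, v) :: t) i h0i
      rw [hdec] at this
      exact this.symm

lemma pvLoopEq (n : Nat) (L : List (Char × Int)) (acc : List Char)
    (hnd : (L.map Prod.fst).Nodup)
    (h1 : ∀ kv ∈ L, 1 ≤ kv.2)
    (hn : ∀ kv ∈ L, kv.2 ≤ (n : Int))
    (hmax : ∀ kv ∈ L, kv.2 ≤ pvTop L) :
    pvLoopA n (acc, PySem.Dict.mk L) = acc ++ pvB L := by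
  induction n generalizing L acc with
  | zero =>
    have hL : L = [] := by
      cases L with
      | nil => rfl
      | cons kv t =>
        have := h1 kv (by simp)
        have := hn kv (by simp)
        omega
    subst hL
    simp [pvLoopA, pvB, pvTop, pvRangeEq]
  | succ n ih =>
    cases L with
    | nil => simp [pvLoopA, pvB, pvTop, pvRangeEq, PySem.Dict.items]
    | cons kv t =>
      set L := kv :: t with hLdef
      have hlen : (PySem.Dict.mk L).items.length > 0 := by simp [hLdef]
      have hround := pvRound L [] acc (by simpa using hnd)
      simp only [List.nil_append] at hround
      have hnd' : ((pvDec L).map Prod.fst).Nodup := by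
        have hsub : ((pvDec L).map Prod.fst).Sublist
            ((L.map (fun kv => (kv.1, kv.2 - 1))).map Prod.fst) :=
          List.Sublist.map Prod.fst List.filter_sublist
        rw [List.map_map] at hsub
        exact List.Nodup.sublist (by simpa using hsub) hnd
      have hmem : ∀ p ∈ pvDec L, ∃ q ∈ L, p = (q.1, q.2 - 1) ∧ ¬ p.2 = 0 := by
        intro p hp
        obtain ⟨hp1, hp2⟩ := List.mem_filter.mp hp
        obtain ⟨q, hq, rfl⟩ := List.mem_map.mp hp1
        exact ⟨q, hq, rfl, by simpa using hp2⟩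
      have h1' : ∀ p ∈ pvDec L, 1 ≤ p.2 := by
        intro p hp
        obtain ⟨q, hq, rfl, hne0⟩ := hmem p hp
        have := h1 q hq
        simp only at hne0 ⊢
        omega
      have hn' : ∀ p ∈ pvDec L, p.2 ≤ (n : Int) := by
        intro p hp
        obtain ⟨q, hq, rfl, -⟩ := hmem p hp
        have := hn q hq
        push_cast at this ⊢
        omega
      have hmax' : ∀ p ∈ pvDec L, p.2 ≤ pvTop (pvDec L) := by
        obtain ⟨c, v⟩ := kv
        by_cases hv : v - 1 = 0
        · intro p hp
          obtain ⟨q, hq, rfl, hne0⟩ := hmem p hp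
          have ha := h1 q hq
          have hb := hmax q hq
          have htop : pvTop L = v := rfl
          rw [htop] at hb
          simp only at hne0
          omega
        · have hdec := pvDecCons c v t hv
          intro p hp
          rw [hLdef, hdec] at hp ⊢
          have htop' : pvTop ((c, v - 1) :: pvDec t) = v - 1 := rfl
          rw [htop']
          rcases List.mem_cons.mp hp with rfl | hp'
          · simp
          · obtain ⟨q, hq, rfl, -⟩ := hmem p (by rw [hLdef, hdec]; exact List.mem_cons_of_mem _ hp')
            have := hmax q hq
            have htop : pvTop L = v := rfl
            rw [htop] at this
            simp only
            omega
      have hBs := pvBstep L (by simp [hLdef]) h1 hmax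
      show pvLoopA (n + 1) (acc, PySem.Dict.mk L) = acc ++ pvB L
      rw [pvLoopA]
      rw [if_pos hlen]
      have : (PySem.Dict.mk L).items = L := rfl
      rw [this, hround, ih (pvDec L) (acc ++ L.map Prod.fst) hnd' h1' hn' hmax']
      rw [hBs, List.append_assoc]
lemma optimize_str_eq (s : String) : optimize_str s = optimize_str_alt s := by
  simp only [optimize_str, optimize_str_alt,
    PySem.Dict.foldl_insert_getD_add_one_eq_counter]
  set xs := s.toList with hxs
  set L := PySem.List.sorted (PySem.Dict.counter xs).items (fun kv => kv.2) true with hL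
  have hperm : L.Perm (PySem.Dict.counter xs).items :=
    PySem.List.sorted_perm _ _ _
  have hkeys : (((PySem.Dict.counter xs).items).map Prod.fst).Nodup :=
    PySem.Dict.nodup_keys_counter xs
  have hndL : (L.map Prod.fst).Nodup := ((hperm.map Prod.fst).nodup_iff).mpr hkeys
  have hmemL : ∀ kv ∈ L, ∃ k, k ∈ xs ∧ kv = (k, (xs.count k : Int)) := by
    intro kv hkv
    have : kv ∈ (PySem.Dict.counter xs).items := (PySem.List.mem_sorted _ _ _ _).mp hkv
    rw [PySem.Dict.items_counter] at this
    obtain ⟨k, hk, rfl⟩ := List.mem_map.mp this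
    exact ⟨k, (PySem.Set.mem_ofList xs k).mp hk, rfl⟩
  have h1 : ∀ kv ∈ L, 1 ≤ kv.2 := by
    intro kv hkv
    obtain ⟨k, hk, rfl⟩ := hmemL kv hkv
    have := List.count_pos_iff.mpr hk
    simp only
    omega
  have hn : ∀ kv ∈ L, kv.2 ≤ (xs.length : Int) := by
    intro kv hkv
    obtain ⟨k, hk, rfl⟩ := hmemL kv hkv
    have := List.count_le_length (l := xs) (a := k)
    simp only
    omega
  have hmax : ∀ kv ∈ L, kv.2 ≤ pvTop L := by
    have hpw := PySem.List.sorted_pairwise_rev (PySem.Dict.counter xs).items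
      (fun kv : Char × Int => kv.2)
    rw [← hL] at hpw
    cases hLc : L with
    | nil => simp [hLc]
    | cons kv t =>
      rw [hLc] at hpw
      intro p hp
      rcases List.mem_cons.mp hp with rfl | hp'
      · simp [pvTop]
      · exact (List.pairwise_cons.mp hpw).1 p hp'
  have hof : (PySem.Dict.ofList L).items = L := by
    have := PySem.Dict.items_foldl_insert_fresh L (fun p => p.1) (fun p => p.2)
      PySem.Dict.empty (by intro a _; simp [PySem.Dict.contains, PySem.Dict.empty]) hndL
    simpa [PySem.Dict.ofList, PySem.Dict.update, PySem.Dict.empty] using this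
  have heq : PySem.Dict.ofList L = PySem.Dict.mk L := PySem.Dict.ext (by rw [hof])
  rw [heq, pvLoopEq xs.length L [] hndL h1 hn hmax, List.nil_append]
  cases L with
  | nil => rfl
  | cons kv t => rfl

-- ===== VERDICT (by name: the statement is the Claim_ definition above) =====
theorem optimize_str_spec : Claim_equal_optimize_str := by
  intro s _
  unfold Spec_optimize_str
  exact optimize_str_eq s
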